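-- pv_equiv track=rewrite | github.com/ernestoyaquello/AdventOfCode | 2021/day08.py | get_segment_length_to_digits
-- ===== SOURCE A (Python) =====
-- def get_segment_length_to_digits(digit_to_segment):
--     segment_length_to_digits = {}
--
--     for digit, digit_segments in digit_to_segment.items():
--         if len(digit_segments) not in segment_length_to_digits:
--             segment_length_to_digits[len(digit_segments)] = [digit]
--         else:
--             segment_length_to_digits[len(digit_segments)].append(digit)
--
--     return segment_length_to_digits
-- ===== SOURCE B (Python) =====
-- def get_segment_length_to_digits(digit_to_segment):
--     # Two-phase: collect the distinct segment lengths in first-occurrence order,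
--     # then build each bucket with one filtering pass per length.
--     lengths = []
--     for segments in digit_to_segment.values():
--         if len(segments) not in lengths:
--             lengths.append(len(segments))
--     return {
--         length: [digit for digit, segments in digit_to_segment.items() if len(segments) == length]
--         for length in lengths
--     }
-- ===== Notes on version B (the rewrite author's own statement) =====
-- stated objective: alternative
-- what changed: A buckets online in one pass, mutating a dict of growing lists; B first collects the distinct segment lengths in first-occurrence order and then builds each bucket with a separate filtering pass over the items.
import Mathlib
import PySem

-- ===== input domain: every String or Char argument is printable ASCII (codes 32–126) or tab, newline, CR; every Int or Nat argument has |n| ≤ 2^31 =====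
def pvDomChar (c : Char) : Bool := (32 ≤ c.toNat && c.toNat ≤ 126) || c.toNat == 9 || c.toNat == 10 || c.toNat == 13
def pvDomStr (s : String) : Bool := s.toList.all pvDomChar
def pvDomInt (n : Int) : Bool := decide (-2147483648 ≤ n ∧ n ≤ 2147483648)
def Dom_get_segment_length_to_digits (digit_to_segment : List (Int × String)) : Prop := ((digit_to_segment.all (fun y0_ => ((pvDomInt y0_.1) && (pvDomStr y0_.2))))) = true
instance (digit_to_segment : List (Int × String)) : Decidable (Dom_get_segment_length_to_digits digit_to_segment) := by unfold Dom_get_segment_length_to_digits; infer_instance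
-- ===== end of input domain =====

-- B replaces A's online dict-bucketing by a two-phase pass (distinct lengths first, then one filter per length); alternative decomposition, no speed claim.

-- ===== PORT A =====
-- A: one loop over the items, an accumulating dict of buckets (insert a fresh bucket, or append to it).
def get_segment_length_to_digits (digit_to_segment : List (Int × String)) : List (Int × List Int) :=
  (digit_to_segment.foldl
    (fun d kv =>
      let L : Int := PySem.Str.len kv.2
      if d.contains L = false then d.insert L [kv.1]
      else d.modify L [] (fun ds => ds ++ [kv.1]))
    (PySem.Dict.empty : PySem.Dict Int (List Int))).items

-- ===== PORT B =====
-- B: the distinct segment lengths in first-occurrence order, then one filtering pass per length.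
def glt_lengths (digit_to_segment : List (Int × String)) : List Int :=
  digit_to_segment.foldl
    (fun ls kv => if (PySem.Str.len kv.2) ∈ ls then ls else ls ++ [PySem.Str.len kv.2]) []

def get_segment_length_to_digits_alt (digit_to_segment : List (Int × String)) : List (Int × List Int) :=
  (glt_lengths digit_to_segment).map
    (fun L => (L, (digit_to_segment.filter (fun kv => PySem.Str.len kv.2 == L)).map (fun kv => kv.1)))

-- ===== PRECONDITION & SPEC =====
def Spec_get_segment_length_to_digits (digit_to_segment : List (Int × String)) (out : List (Int × List Int)) : Prop := out = get_segment_length_to_digits_alt digit_to_segment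
instance (digit_to_segment : List (Int × String)) (out : List (Int × List Int)) : Decidable (Spec_get_segment_length_to_digits digit_to_segment out) := by unfold Spec_get_segment_length_to_digits; infer_instance

-- ===== CLAIM (what is proved, stated in full; the proofs are below) =====
def Claim_equal_get_segment_length_to_digits : Prop := ∀ (digit_to_segment : List (Int × String)), Dom_get_segment_length_to_digits digit_to_segment → Spec_get_segment_length_to_digits digit_to_segment (get_segment_length_to_digits digit_to_segment)

-- ===== LEMMAS AND PROOFS =====

-- A's fold equals the modify-with-default fold over the (length, digit) pairs.
lemma glt_foldA_eq (dts : List (Int × String)) :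
    (dts.foldl
      (fun d kv =>
        let L : Int := PySem.Str.len kv.2
        if d.contains L = false then d.insert L [kv.1]
        else d.modify L [] (fun ds => ds ++ [kv.1]))
      (PySem.Dict.empty : PySem.Dict Int (List Int))) =
    ((dts.map (fun kv => (PySem.Str.len kv.2, kv.1))).foldl
      (fun d p => d.modify p.1 [] (fun ds => ds ++ [p.2]))
      (PySem.Dict.empty : PySem.Dict Int (List Int))) := by
  rw [List.foldl_map]
  congr 1
  funext d kv
  show (if d.contains (PySem.Str.len kv.2) = false then d.insert (PySem.Str.len kv.2) [kv.1]
        else d.modify (PySem.Str.len kv.2) [] (fun ds => ds ++ [kv.1]))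
      = d.modify (PySem.Str.len kv.2) [] (fun ds => ds ++ [kv.1])
  by_cases hc : d.contains (PySem.Str.len kv.2) = false
  · rw [if_pos hc]
    show d.insert _ [kv.1] = d.insert _ (d.getD _ [] ++ [kv.1])
    rw [PySem.Dict.getD_of_not_contains d [] hc]
    rfl
  · rw [if_neg hc]

-- B's length pass is the Set.update of the mapped lengths (the keys of A's dict).
lemma glt_lengths_eq (dts : List (Int × String)) :
    glt_lengths dts = PySem.Set.update [] (dts.map (fun kv => PySem.Str.len kv.2)) := by
  unfold glt_lengths
  simp only [PySem.Set.update, List.foldl_map]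
  congr 1
  funext ls kv
  simp [PySem.Set.add, PySem.Set.contains]

-- Each bucket of A's dict is B's filtered digit list.
lemma glt_getD_eq (dts : List (Int × String)) (c : Int) :
    ((dts.map (fun kv => (PySem.Str.len kv.2, kv.1))).foldl
      (fun d p => d.modify p.1 [] (fun ds => ds ++ [p.2]))
      (PySem.Dict.empty : PySem.Dict Int (List Int))).getD c []
    = (dts.filter (fun kv => PySem.Str.len kv.2 == c)).map (fun kv => kv.1) := by
  rw [PySem.Dict.getD_foldl_modify_append]
  simp [List.filter_map, Function.comp_def, List.map_map]

-- ===== VERDICT (by name: the statement is the Claim_ definition above) =====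
theorem get_segment_length_to_digits_spec : Claim_equal_get_segment_length_to_digits := by
  intro dts _
  show get_segment_length_to_digits dts = get_segment_length_to_digits_alt dts
  unfold get_segment_length_to_digits get_segment_length_to_digits_alt
  rw [glt_foldA_eq]
  have hnd : ((dts.map (fun kv => (PySem.Str.len kv.2, kv.1))).foldl
      (fun d p => d.modify p.1 [] (fun ds => ds ++ [p.2]))
      (PySem.Dict.empty : PySem.Dict Int (List Int))).keys.Nodup := by
    exact PySem.Dict.nodup_keys_foldl_modify_key _ _ _ _ _ PySem.Dict.nodup_keys_empty
  rw [PySem.Dict.items_eq_map_keys _ hnd []]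
  rw [PySem.Dict.keys_foldl_modify_key, glt_lengths_eq]
  simp only [PySem.Dict.keys_empty, List.map_map]
  apply List.map_congr_left
  intro L _
  rw [glt_getD_eq]
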